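-- pv_equiv track=rewrite | github.com/Naawa-Consulting/benchmarking-app | services/api/app/data/study_config.py | _pick_best_match
-- ===== SOURCE A (Python) =====
-- def _pick_best_match(candidates: list[str], normalized: dict[str, str]) -> str | None:
--     exact = [normalized[key] for key in normalized.keys() if key in candidates]
--     if exact:
--         return sorted(exact, key=len)[0]
--
--     contains = []
--     for key, original in normalized.items():
--         for candidate in candidates:
--             if candidate in key:
--                 contains.append(original)
--                 break
--     if contains:
--         return sorted(contains, key=len)[0]
--     return None
-- ===== SOURCE B (Python) =====
-- def _pick_best_match(candidates: list[str], normalized: dict[str, str]) -> str | None: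
--     best_exact = None
--     best_contains = None
--     for key, original in normalized.items():
--         if key in candidates:
--             value = normalized[key]
--             if best_exact is None or len(value) < len(best_exact):
--                 best_exact = value
--         if any(candidate in key for candidate in candidates):
--             if best_contains is None or len(original) < len(best_contains):
--                 best_contains = original
--     return best_exact if best_exact is not None else best_contains
-- ===== Notes on version B (the rewrite author's own statement) =====
-- stated objective: alternative
-- what changed: Replaces A's build-two-lists-then-stable-sort-and-take-head decomposition by a single pass over normalized.items() that maintains two running first-minimum accumulators (best exact match, best substring match) and resolves the exact-over-contains priority once at the end.
import Mathlib
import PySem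

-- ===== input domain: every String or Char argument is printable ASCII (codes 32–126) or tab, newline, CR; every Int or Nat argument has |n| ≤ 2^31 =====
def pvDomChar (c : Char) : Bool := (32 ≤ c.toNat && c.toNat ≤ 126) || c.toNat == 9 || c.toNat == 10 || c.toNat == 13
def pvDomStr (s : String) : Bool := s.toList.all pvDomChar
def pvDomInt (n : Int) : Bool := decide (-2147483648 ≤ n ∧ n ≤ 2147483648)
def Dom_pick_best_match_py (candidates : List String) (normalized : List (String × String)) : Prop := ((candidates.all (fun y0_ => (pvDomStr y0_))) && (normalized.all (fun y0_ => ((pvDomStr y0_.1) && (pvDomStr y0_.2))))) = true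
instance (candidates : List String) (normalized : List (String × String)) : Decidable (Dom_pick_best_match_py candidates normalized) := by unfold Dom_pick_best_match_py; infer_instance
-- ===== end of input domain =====

-- B replaces A's collect-sort-index decomposition by one pass keeping two running first-minima; same result on every input.

-- ===== PORT A =====
def pick_best_match_py (candidates : List String) (normalized : List (String × String)) : Option String :=
  let d : PySem.Dict String String := PySem.Dict.mk normalized
  -- exact = [normalized[key] for key in normalized.keys() if key in candidates]
  -- (the lookup normalized[key] always succeeds here since key comes from normalized.keys(); .getD "" is never reached)
  let exact : List String :=
    ((normalized.map Prod.fst).filter (fun key => candidates.contains key)).map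
      (fun key => (d.get? key).getD "")
  if exact ≠ [] then (PySem.List.sorted exact PySem.Str.len).head?
  else
    let contains : List String :=
      normalized.foldl (fun acc kv =>
        if candidates.any (fun c => PySem.Str.isIn c kv.1) then acc ++ [kv.2] else acc) []
    if contains ≠ [] then (PySem.List.sorted contains PySem.Str.len).head? else none

-- ===== PORT B =====
-- keep the shorter of `best` and `v`, first one on ties (strict `<`)
def pvUpdMin (best : Option String) (v : String) : Option String :=
  match best with
  | none => some v
  | some b => if PySem.Str.len v < PySem.Str.len b then some v else some b

-- one loop-body step of Source B: update best_exact, then best_contains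
def pvAltStep (candidates : List String) (d : PySem.Dict String String)
    (st : Option String × Option String) (kv : String × String) :
    Option String × Option String :=
  let st1 := if candidates.contains kv.1 then (pvUpdMin st.1 ((d.get? kv.1).getD ""), st.2) else st
  if candidates.any (fun c => PySem.Str.isIn c kv.1) then (st1.1, pvUpdMin st1.2 kv.2) else st1

def pick_best_match_py_alt (candidates : List String) (normalized : List (String × String)) : Option String :=
  let st := normalized.foldl (pvAltStep candidates (PySem.Dict.mk normalized)) (none, none)
  match st.1 with
  | some v => some v
  | none => st.2

-- ===== PRECONDITION & SPEC =====
def Spec_pick_best_match_py (candidates : List String) (normalized : List (String × String)) (out : Option String) : Prop := out = pick_best_match_py_alt candidates normalized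
instance (candidates : List String) (normalized : List (String × String)) (out : Option String) : Decidable (Spec_pick_best_match_py candidates normalized out) := by unfold Spec_pick_best_match_py; infer_instance

-- ===== CLAIM (what is proved, stated in full; the proofs are below) =====
def Claim_equal_pick_best_match_py : Prop := ∀ (candidates : List String) (normalized : List (String × String)), Dom_pick_best_match_py candidates normalized → Spec_pick_best_match_py candidates normalized (pick_best_match_py candidates normalized)

-- ===== LEMMAS AND PROOFS =====

-- head of a stable insertion step = one first-min update
lemma pv_head?_insertBy (key : String → Int) (x : String) (l : List String) :
    (PySem.List.insertBy (fun a b => decide (key a < key b)) x l).head? =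
      match l.head? with
      | none => some x
      | some m => if key x < key m then some x else some m := by
  cases l with
  | nil => rfl
  | cons y ys =>
    simp only [PySem.List.insertBy, List.head?_cons]
    by_cases h : key x < key y <;> simp [h]

-- head of the stable sort = run of first-min updates (Python: sorted(xs, key=len)[0] vs the accumulator loop)
lemma pv_head?_sorted (xs : List String) :
    (PySem.List.sorted xs PySem.Str.len).head? = xs.foldl pvUpdMin none := by
  rw [PySem.List.sorted_eq_foldl_insertBy]
  induction xs using List.reverseRecOn with
  | nil => rfl
  | append_singleton xs x ih =>
    rw [List.foldl_append, List.foldl_append]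
    simp only [List.foldl_cons, List.foldl_nil]
    rw [pv_head?_insertBy, ih]
    cases xs.foldl pvUpdMin none
    · simp [pvUpdMin]
    · simp [pvUpdMin]

lemma pv_foldl_updMin_eq_none_iff (xs : List String) (s : Option String) :
    xs.foldl pvUpdMin s = none ↔ xs = [] ∧ s = none := by
  induction xs generalizing s with
  | nil => simp
  | cons x t ih =>
    simp only [List.foldl_cons, ih]
    constructor
    · rintro ⟨_, h⟩; cases s <;> simp [pvUpdMin] at h <;> split at h <;> simp_all
    · rintro ⟨h, _⟩; exact absurd h (by simp)

-- the single pass of B is the two independent first-min runs over A's two lists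
lemma pv_alt_fold (cs : List String) (d : PySem.Dict String String) :
    ∀ (l : List (String × String)) (st : Option String × Option String),
      l.foldl (pvAltStep cs d) st =
        ((((l.map Prod.fst).filter (fun key => cs.contains key)).map
            (fun key => (d.get? key).getD "")).foldl pvUpdMin st.1,
         ((l.filter (fun kv => cs.any (fun c => PySem.Str.isIn c kv.1))).map Prod.snd).foldl
            pvUpdMin st.2) := by
  intro l
  induction l with
  | nil => intro st; rfl
  | cons kv t ih =>
    intro st
    rw [List.foldl_cons, ih]
    by_cases h1 : kv.1 ∈ cs <;>
      by_cases h2 : ∃ c ∈ cs, PySem.Chars.isIn c.toList kv.1.toList = true <;>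
        simp [pvAltStep, h1, h2]

-- A's collect-sort-take-head on the two lists equals B's final match on the two running minima
lemma pv_final (E C : List String) :
    (if E ≠ [] then (PySem.List.sorted E PySem.Str.len).head?
     else if C ≠ [] then (PySem.List.sorted C PySem.Str.len).head? else none) =
      (match E.foldl pvUpdMin none with
       | some v => some v
       | none => C.foldl pvUpdMin none) := by
  cases he : E.foldl pvUpdMin none with
  | none =>
    have hE : E = [] := ((pv_foldl_updMin_eq_none_iff E none).1 he).1
    subst hE
    simp only [ne_eq, not_true_eq_false, if_false]
    by_cases hc : C = []
    · subst hc; simp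
    · simp [hc, pv_head?_sorted]
  | some v =>
    have hE : E ≠ [] := by rintro rfl; simp at he
    simp [hE, pv_head?_sorted, he]

-- ===== VERDICT (by name: the statement is the Claim_ definition above) =====
theorem pick_best_match_py_spec : Claim_equal_pick_best_match_py := by
  intro candidates normalized _
  unfold Spec_pick_best_match_py
  simp only [pick_best_match_py, pick_best_match_py_alt]
  rw [pv_alt_fold,
    PySem.List.foldl_append_if (p := fun kv => candidates.any (fun c => PySem.Str.isIn c kv.1))
      (f := Prod.snd), List.nil_append]
  exact pv_final _ _
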